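-- pv_equiv track=rewrite | github.com/IbrohimUmar/oson_express | config/driver/send_barcode/main_api.py | find_exact_match_orders
-- ===== SOURCE A (Python) =====
-- def find_exact_match_orders(cancelled_orders, search_values):
--     exact_match_orders = set()
--     search_values_count = {value: search_values.count(value) for value in search_values}
--     for order_number, values in cancelled_orders.items():
--         values_count = {value: values.count(value) for value in values}
--         if values_count == search_values_count:
--             exact_match_orders.add(order_number)
--     return exact_match_orders
-- ===== SOURCE B (Python) =====
-- def find_exact_match_orders(cancelled_orders, search_values):
--     target = sorted(search_values)
--     return {order_number
--             for order_number, values in cancelled_orders.items()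
--             if sorted(values) == target}
-- ===== Notes on version B (the rewrite author's own statement) =====
-- stated objective: faster
-- what changed: Multiset equality is tested by comparing a sorted canonical form (target computed once) instead of building and comparing per-value .count() frequency dictionaries, replacing the quadratic counting with one sort per list.
import Mathlib
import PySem

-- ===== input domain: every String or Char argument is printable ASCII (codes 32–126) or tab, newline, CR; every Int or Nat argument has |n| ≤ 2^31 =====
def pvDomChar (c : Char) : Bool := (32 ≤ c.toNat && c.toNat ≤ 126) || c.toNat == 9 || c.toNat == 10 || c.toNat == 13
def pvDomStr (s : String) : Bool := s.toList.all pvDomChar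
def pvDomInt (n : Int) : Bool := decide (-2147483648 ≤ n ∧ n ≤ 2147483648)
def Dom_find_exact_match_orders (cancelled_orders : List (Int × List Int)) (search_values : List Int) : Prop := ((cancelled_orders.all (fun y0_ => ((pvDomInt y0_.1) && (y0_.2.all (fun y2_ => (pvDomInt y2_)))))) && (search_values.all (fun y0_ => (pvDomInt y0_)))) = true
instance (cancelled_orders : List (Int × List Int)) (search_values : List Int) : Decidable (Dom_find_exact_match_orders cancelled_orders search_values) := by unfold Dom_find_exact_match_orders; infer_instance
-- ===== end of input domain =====

-- B replaces A's per-order frequency-dictionary comparison by comparing a sorted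
-- canonical form computed once (objective: simpler).

-- ===== PORT A =====
-- {value: xs.count(value) for value in xs}
def pvCountDict (xs : List Int) : PySem.Dict Int Int :=
  xs.foldl (fun d v => d.insert v (xs.count v : Int)) PySem.Dict.empty

-- Python's dict ==: same key set and the same value at every key (order-insensitive)
def pvDictEq (d1 d2 : PySem.Dict Int Int) : Bool :=
  PySem.Set.equal (PySem.Dict.keys d1) (PySem.Dict.keys d2) &&
    (PySem.Dict.keys d1).all (fun k => PySem.Dict.get? d1 k == PySem.Dict.get? d2 k)

def find_exact_match_orders (cancelled_orders : List (Int × List Int)) (search_values : List Int) : List Int :=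
  let search_values_count := pvCountDict search_values
  cancelled_orders.foldl
    (fun exact_match_orders p =>
      let values_count := pvCountDict p.2
      if pvDictEq values_count search_values_count then
        PySem.Set.add exact_match_orders p.1
      else exact_match_orders)
    PySem.Set.empty

-- ===== PORT B =====
def find_exact_match_orders_alt (cancelled_orders : List (Int × List Int)) (search_values : List Int) : List Int :=
  let target := PySem.List.sorted search_values (fun x => x) false
  cancelled_orders.foldl
    (fun s p =>
      if PySem.List.sorted p.2 (fun x => x) false = target then PySem.Set.add s p.1 else s)
    PySem.Set.empty

-- ===== PRECONDITION & SPEC =====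
def Spec_find_exact_match_orders (cancelled_orders : List (Int × List Int)) (search_values : List Int) (out : List Int) : Prop := out = find_exact_match_orders_alt cancelled_orders search_values
instance (cancelled_orders : List (Int × List Int)) (search_values : List Int) (out : List Int) : Decidable (Spec_find_exact_match_orders cancelled_orders search_values out) := by unfold Spec_find_exact_match_orders; infer_instance

-- ===== CLAIM (what is proved, stated in full; the proofs are below) =====
def Claim_equal_find_exact_match_orders : Prop := ∀ (cancelled_orders : List (Int × List Int)) (search_values : List Int), Dom_find_exact_match_orders cancelled_orders search_values → Spec_find_exact_match_orders cancelled_orders search_values (find_exact_match_orders cancelled_orders search_values)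

-- ===== LEMMAS AND PROOFS =====

theorem pvCountDict_get?_aux (xs l : List Int) (d : PySem.Dict Int Int) (v : Int) :
    (l.foldl (fun d w => d.insert w (xs.count w : Int)) d).get? v =
      if v ∈ l then some (xs.count v : Int) else d.get? v := by
  induction l generalizing d with
  | nil => simp
  | cons h t ih =>
      simp only [List.foldl_cons, ih, List.mem_cons]
      by_cases hv : v ∈ t
      · simp [hv]
      · by_cases he : v = h
        · simp [he, PySem.Dict.get?_insert_self]
        · simp [hv, he, PySem.Dict.get?_insert]

theorem pvCountDict_get? (xs : List Int) (v : Int) :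
    (pvCountDict xs).get? v = if v ∈ xs then some (xs.count v : Int) else none := by
  simpa [PySem.Dict.get?_empty] using pvCountDict_get?_aux xs xs PySem.Dict.empty v

theorem pvDictEq_iff (d1 d2 : PySem.Dict Int Int) :
    pvDictEq d1 d2 = true ↔ ∀ k, d1.get? k = d2.get? k := by
  unfold pvDictEq
  simp only [Bool.and_eq_true, List.all_eq_true, beq_iff_eq, PySem.Set.equal_iff]
  constructor
  · rintro ⟨hk, hv⟩ k
    by_cases hm : k ∈ d1.keys
    · exact hv k hm
    · have hm2 : k ∉ d2.keys := fun h => hm ((hk k).mpr h)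
      rw [(PySem.Dict.get?_eq_none_iff_not_mem_keys _ _).mpr hm,
          (PySem.Dict.get?_eq_none_iff_not_mem_keys _ _).mpr hm2]
  · intro h
    refine ⟨fun k => ?_, fun k _ => h k⟩
    constructor <;> intro hm
    · by_contra hm2
      have := h k
      rw [(PySem.Dict.get?_eq_none_iff_not_mem_keys _ _).mpr hm2] at this
      exact ((PySem.Dict.get?_eq_none_iff_not_mem_keys _ _).mp this) hm
    · by_contra hm1
      have := h k
      rw [(PySem.Dict.get?_eq_none_iff_not_mem_keys _ _).mpr hm1] at this
      exact ((PySem.Dict.get?_eq_none_iff_not_mem_keys _ _).mp this.symm) hm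

theorem pvCond_eq (vs sv : List Int) :
    pvDictEq (pvCountDict vs) (pvCountDict sv) = true ↔
      PySem.List.sorted vs (fun x => x) false = PySem.List.sorted sv (fun x => x) false := by
  rw [pvDictEq_iff, PySem.List.sorted_id_eq_sorted_id_iff_perm, List.perm_iff_count]
  constructor
  · intro h v
    have := h v
    rw [pvCountDict_get?, pvCountDict_get?] at this
    by_cases h1 : v ∈ vs <;> by_cases h2 : v ∈ sv <;>
      simp_all [List.count_eq_zero_of_not_mem]
  · intro h v
    rw [pvCountDict_get?, pvCountDict_get?]
    have hc := h v
    by_cases h1 : v ∈ vs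
    · have h2 : v ∈ sv := by
        by_contra h2
        exact (List.count_eq_zero.mp (hc.trans (List.count_eq_zero_of_not_mem h2))) h1
      simp [h1, h2, hc]
    · have h2 : v ∉ sv := fun h2 =>
        (List.count_eq_zero.mp (hc.symm.trans (List.count_eq_zero_of_not_mem h1))) h2
      simp [h1, h2]

-- ===== VERDICT (by name: the statement is the Claim_ definition above) =====
theorem find_exact_match_orders_spec : Claim_equal_find_exact_match_orders := by
  intro co sv _
  unfold Spec_find_exact_match_orders find_exact_match_orders find_exact_match_orders_alt
  refine PySem.List.foldl_congr_mem _ _ _ _ (fun acc p _ => ?_)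
  by_cases h : PySem.List.sorted p.2 (fun x => x) false = PySem.List.sorted sv (fun x => x) false
  · rw [if_pos ((pvCond_eq p.2 sv).mpr h), if_pos h]
  · rw [if_neg (fun hb => h ((pvCond_eq p.2 sv).mp hb)), if_neg h]
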